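-- pv_equiv track=rewrite | github.com/fasrc/slurmmon | lib/python/site-packages/slurmmon/config.py | job_script_line_is_interesting
-- ===== SOURCE A (Python) =====
-- def job_script_line_is_interesting(line, job=None):
-- 	"""Return whether or not the line of text is worthwhile as a job script preview.
--
-- 	The given line will be stripped of leading and trailing whitespace and will
-- 	not be the empty string or a comment.
-- 	"""
-- 	for s in (
-- 		'wait',
-- 		'echo',
-- 		'cd',
-- 		'mkdir', '/bin/mkdir',
-- 		'cp', '/bin/cp',
-- 		'rm', '/bin/rm',
-- 		'mv', '/bin/mv',
-- 		'rsync', '/usr/bin/rsync',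
-- 		'tar', '/bin/tar',
-- 		'gzip', '/bin/gzip',
-- 		):
-- 		if line==s or line.startswith(s+' '):
-- 			return False
-- 	return True
-- ===== SOURCE B (Python) =====
-- BORING = frozenset((
--     'wait', 'echo', 'cd',
--     'mkdir', '/bin/mkdir',
--     'cp', '/bin/cp',
--     'rm', '/bin/rm',
--     'mv', '/bin/mv',
--     'rsync', '/usr/bin/rsync',
--     'tar', '/bin/tar',
--     'gzip', '/bin/gzip',
-- ))
--
-- def job_script_line_is_interesting(line, job=None):
--     """Interesting iff the line's first space-delimited token is not a boring command."""
--     i = line.find(' ')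
--     token = line if i < 0 else line[:i]
--     return token not in BORING
-- ===== Notes on version B (the rewrite author's own statement) =====
-- stated objective: idiomatic
-- what changed: A scans 17 boring commands, testing each for equality or being a space-terminated prefix of the line; B extracts the line's first space-delimited token once (everything before the first space, or the whole line) and does a single frozenset membership test.
import Mathlib
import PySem

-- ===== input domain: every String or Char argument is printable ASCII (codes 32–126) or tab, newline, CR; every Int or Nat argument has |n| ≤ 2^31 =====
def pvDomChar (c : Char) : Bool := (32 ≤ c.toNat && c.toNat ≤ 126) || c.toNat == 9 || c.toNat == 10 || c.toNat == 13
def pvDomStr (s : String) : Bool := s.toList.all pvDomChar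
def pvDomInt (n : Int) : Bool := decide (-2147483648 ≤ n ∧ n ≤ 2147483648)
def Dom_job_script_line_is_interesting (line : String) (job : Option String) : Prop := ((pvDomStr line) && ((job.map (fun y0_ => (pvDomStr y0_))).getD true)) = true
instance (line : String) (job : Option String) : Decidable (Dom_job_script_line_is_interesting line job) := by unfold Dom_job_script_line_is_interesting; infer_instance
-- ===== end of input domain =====

-- B replaces A's 17-way startswith scan by one pass that extracts the first
-- space-delimited token and a single frozenset membership test (idiomatic; job is unused by both).

-- ===== PORT A =====
-- the tuple A iterates over
def pvBoringTuple : List String :=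
  ["wait", "echo", "cd", "mkdir", "/bin/mkdir", "cp", "/bin/cp", "rm", "/bin/rm",
   "mv", "/bin/mv", "rsync", "/usr/bin/rsync", "tar", "/bin/tar", "gzip", "/bin/gzip"]

-- the for-loop with its early `return False`
def pvLoopA (line : String) : List String → Bool
  | [] => true
  | s :: rest =>
      if line == s || PySem.Str.startswith line (s ++ " ") then false
      else pvLoopA line rest

def job_script_line_is_interesting (line : String) (job : Option String) : Bool :=
  pvLoopA line pvBoringTuple

-- ===== PORT B =====
-- BORING = frozenset((...))
def pvBoringSet : List String :=
  PySem.Set.ofList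
    ["wait", "echo", "cd", "mkdir", "/bin/mkdir", "cp", "/bin/cp", "rm", "/bin/rm",
     "mv", "/bin/mv", "rsync", "/usr/bin/rsync", "tar", "/bin/tar", "gzip", "/bin/gzip"]

def job_script_line_is_interesting_alt (line : String) (job : Option String) : Bool :=
  let i := PySem.Str.find line " "
  let token := if i < 0 then line else PySem.Str.slice line none (some i)
  !(pvBoringSet.contains token)

-- ===== PRECONDITION & SPEC =====
def Spec_job_script_line_is_interesting (line : String) (job : Option String) (out : Bool) : Prop := out = job_script_line_is_interesting_alt line job
instance (line : String) (job : Option String) (out : Bool) : Decidable (Spec_job_script_line_is_interesting line job out) := by unfold Spec_job_script_line_is_interesting; infer_instance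

-- ===== CLAIM (what is proved, stated in full; the proofs are below) =====
def Claim_equal_job_script_line_is_interesting : Prop := ∀ (line : String) (job : Option String), Dom_job_script_line_is_interesting line job → Spec_job_script_line_is_interesting line job (job_script_line_is_interesting line job)

-- ===== LEMMAS AND PROOFS =====

-- singleton prefix = head
theorem pv_singleton_prefix (l : List Char) (a : Char) : [a] <+: l ↔ l.head? = some a := by
  cases l <;> simp [List.cons_prefix_cons, eq_comm]

-- take n equals takeWhile when n marks the first failure of p
theorem pv_take_eq_takeWhile {p : Char → Bool} (cs : List Char) (n : Nat) (hn : n ≤ cs.length)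
    (h1 : ∀ j (hj : j < n), p (cs[j]'(Nat.lt_of_lt_of_le hj hn)) = true)
    (h2 : ∀ (h : n < cs.length), p (cs[n]'h) = false) :
    cs.takeWhile p = cs.take n := by
  induction cs generalizing n with
  | nil => simp
  | cons c t ih =>
    cases n with
    | zero =>
      have := h2 (by simp)
      simp_all [List.takeWhile_cons]
    | succ m =>
      have hc : p c = true := h1 0 (Nat.succ_pos m)
      simp only [List.takeWhile_cons, hc, if_true, List.take_succ_cons]
      have := ih m (by simpa using hn)
        (fun j hj => h1 (j+1) (by omega))
        (fun h => h2 (by simpa using Nat.succ_lt_succ h))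
      simp [this]

-- B's token is the longest space-free prefix of the line
theorem pv_token_toList (line : String) :
    (if PySem.Str.find line " " < 0 then line
     else PySem.Str.slice line none (some (PySem.Str.find line " "))).toList
      = line.toList.takeWhile (· ≠ ' ') := by
  by_cases h : PySem.Str.find line " " < 0
  · simp only [h, if_true]
    have h1 : PySem.Str.find line " " = -1 := by
      have := PySem.Chars.neg_one_le_find line.toList " ".toList
      simp only [PySem.Str.find_eq] at h ⊢
      omega
    rw [PySem.Str.find_eq] at h1
    have h2 : ¬ ([' '] <:+: line.toList) := by
      have := (PySem.Chars.find_eq_neg_one_iff line.toList [' ']).mp (by simpa using h1)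
      simpa using this
    symm
    rw [List.takeWhile_eq_self_iff]
    intro x hx
    simp only [decide_eq_true_eq]
    intro hx'
    obtain ⟨u, v, huv⟩ := List.append_of_mem (hx' ▸ hx)
    exact h2 ⟨u, v, by rw [huv]; simp⟩
  · rw [if_neg h]
    rw [PySem.Str.find_eq] at h
    replace h : (0:Int) ≤ PySem.Chars.find line.toList " ".toList := not_lt.mp h
    set i := PySem.Chars.find line.toList " ".toList with hi
    have hfs := PySem.Chars.find_spec (s := line.toList) (sub := " ".toList) (by simpa using h)
    have hle : i ≤ line.toList.length := by simpa using PySem.Chars.find_le_length line.toList " ".toList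
    rw [PySem.Str.toList_slice, PySem.Chars.slice_eq_listSlice, PySem.Str.find_eq, ← hi,
        PySem.List.slice_to _ (by simpa using h)]
    symm
    apply pv_take_eq_takeWhile _ i.toNat (by omega)
    · intro j hj
      have hmin := hfs.2 j hj
      simp only [show (" ".toList) = [' '] from rfl] at hmin
      rw [pv_singleton_prefix, List.head?_drop] at hmin
      simp only [decide_eq_true_eq]
      intro hc
      have hjlen : j < line.toList.length := by omega
      exact hmin (by rw [List.getElem?_eq_getElem hjlen, hc])
    · intro hlt
      have hpre := hfs.1
      simp only [show (" ".toList) = [' '] from rfl] at hpre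
      rw [pv_singleton_prefix, List.head?_drop] at hpre
      rw [show (PySem.Chars.find line.toList [' ']).toNat = i.toNat from rfl,
         List.getElem?_eq_getElem hlt] at hpre
      simp only [Option.some.injEq] at hpre
      simp [hpre]

-- takeWhile-token characterisation of A's per-string test (s has no space)
theorem pv_token_iff (s : List Char) (hs : ' ' ∉ s) (cs : List Char) :
    cs.takeWhile (· ≠ ' ') = s ↔ (cs = s ∨ s ++ [' '] <+: cs) := by
  induction s generalizing cs with
  | nil =>
    cases cs with
    | nil => simp
    | cons c t =>
      by_cases hc : c = ' '
      · simp [List.takeWhile_cons, hc, List.cons_prefix_cons]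
      · simp [List.takeWhile_cons, hc, List.cons_prefix_cons, Ne.symm hc]
  | cons a s' ih =>
    have ha : a ≠ ' ' := fun h => hs (h ▸ List.mem_cons_self ..)
    have hs' : ' ' ∉ s' := fun h => hs (List.mem_cons_of_mem _ h)
    cases cs with
    | nil => simp
    | cons c t =>
      by_cases hc : c = ' '
      · subst hc
        simp [List.takeWhile_cons, List.cons_prefix_cons, ha, Ne.symm ha]
      · simp only [List.takeWhile_cons, decide_eq_true_eq]
        rw [if_pos (by simpa using hc)]
        simp only [List.cons_append, List.cons_prefix_cons, List.cons.injEq]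
        rw [ih hs']
        constructor
        · rintro ⟨rfl, h⟩; rcases h with rfl | h
          · exact Or.inl ⟨rfl, rfl⟩
          · exact Or.inr ⟨rfl, h⟩
        · rintro (⟨rfl, rfl⟩ | ⟨rfl, h⟩)
          · exact ⟨rfl, Or.inl rfl⟩
          · exact ⟨rfl, Or.inr h⟩

-- A's per-string test, rewritten through the token
theorem pv_cond_eq (line tok : String) (htok : tok.toList = line.toList.takeWhile (· ≠ ' '))
    (s : String) (hs : ' ' ∉ s.toList) :
    (line == s || PySem.Str.startswith line (s ++ " ")) = (tok == s) := by
  have h1 : (line == s) = true ↔ line.toList = s.toList := by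
    simp [String.toList_inj]
  have h2 : PySem.Str.startswith line (s ++ " ") = true ↔ s.toList ++ [' '] <+: line.toList := by
    rw [PySem.Str.startswith_eq, PySem.Chars.startswith_iff]
    simp
  have h3 : (tok == s) = true ↔ line.toList.takeWhile (· ≠ ' ') = s.toList := by
    rw [beq_iff_eq, ← htok, String.toList_inj]
  rw [Bool.eq_iff_iff]
  simp only [Bool.or_eq_true, h1, h2, h3]
  rw [pv_token_iff s.toList hs line.toList]

-- A's loop is the negated membership scan
theorem pv_loopA_eq (line tok : String) (htok : tok.toList = line.toList.takeWhile (· ≠ ' '))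
    (l : List String) (hl : ∀ s ∈ l, ' ' ∉ s.toList) :
    pvLoopA line l = !(l.any fun s => tok == s) := by
  induction l with
  | nil => simp [pvLoopA]
  | cons s rest ih =>
    rw [pvLoopA, pv_cond_eq line tok htok s (hl s (List.mem_cons_self ..))]
    by_cases h : (tok == s) = true
    · simp [h]
    · simp only [Bool.not_eq_true] at h
      simp [h, ih fun x hx => hl x (List.mem_cons_of_mem _ hx)]

-- the frozenset keeps exactly the tuple's elements (all distinct)
theorem pv_set_eq : pvBoringSet = pvBoringTuple := by decide

-- ===== VERDICT (by name: the statement is the Claim_ definition above) =====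
theorem job_script_line_is_interesting_spec : Claim_equal_job_script_line_is_interesting := by
  intro line job _
  unfold Spec_job_script_line_is_interesting
  unfold job_script_line_is_interesting job_script_line_is_interesting_alt
  rw [pv_set_eq]
  set tok := (if PySem.Str.find line " " < 0 then line
      else PySem.Str.slice line none (some (PySem.Str.find line " "))) with htokdef
  rw [pv_loopA_eq line tok (pv_token_toList line) pvBoringTuple (by decide)]
  simp only [List.contains_eq_any_beq]
  rw [← htokdef]
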